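-- pv_equiv track=rewrite | github.com/kagaer/MasterThesis_HumanA | Final_Scripts/Analysis/MultipleUseFunctions.py | getStrategyCounts
-- ===== SOURCE A (Python) =====
-- def getStrategyCounts(matrix):
--     count_cons = 0
--     count_expl = 0
--     count_total = 0
--     for i in range(len(matrix)):
--         for j in range(len(matrix[0])):
--             if i > j:
--                 count_cons += matrix[i][j]
--                 count_total += matrix[i][j]
--             elif i < j:
--                 count_expl += matrix[i][j]
--                 count_total += matrix[i][j]
--     return round(count_cons,0), round(count_expl,0), count_total
-- ===== SOURCE B (Python) =====
-- def _peel(rows, width):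
--     # Peel the border: first row past column 0 is upper-triangle, first column of the
--     # remaining rows is lower-triangle; recurse on the submatrix with one fewer column.
--     if not rows or width == 0:
--         return 0, 0
--     head, rest = rows[0], rows[1:]
--     expl = sum(head[1:width])
--     cons = sum(r[0] for r in rest)
--     c, e = _peel([r[1:] for r in rest], width - 1)
--     return cons + c, expl + e
--
-- def getStrategyCounts(matrix):
--     n = len(matrix[0]) if matrix else 0
--     cons, expl = _peel(matrix, n)
--     return round(cons, 0), round(expl, 0), cons + expl
-- ===== Notes on version B (the rewrite author's own statement) =====
-- stated objective: alternative
-- what changed: Replaces A's nested index loops with per-cell i>j / i<j branches by a recursive border-peeling: each step takes the first row's tail (upper triangle), the first column of the remaining rows (lower triangle), and recurses on the submatrix with the first row and column removed; the total is derived as cons + expl; Pre_ excludes only the ragged matrices on which A raises IndexError.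
import Mathlib
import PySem

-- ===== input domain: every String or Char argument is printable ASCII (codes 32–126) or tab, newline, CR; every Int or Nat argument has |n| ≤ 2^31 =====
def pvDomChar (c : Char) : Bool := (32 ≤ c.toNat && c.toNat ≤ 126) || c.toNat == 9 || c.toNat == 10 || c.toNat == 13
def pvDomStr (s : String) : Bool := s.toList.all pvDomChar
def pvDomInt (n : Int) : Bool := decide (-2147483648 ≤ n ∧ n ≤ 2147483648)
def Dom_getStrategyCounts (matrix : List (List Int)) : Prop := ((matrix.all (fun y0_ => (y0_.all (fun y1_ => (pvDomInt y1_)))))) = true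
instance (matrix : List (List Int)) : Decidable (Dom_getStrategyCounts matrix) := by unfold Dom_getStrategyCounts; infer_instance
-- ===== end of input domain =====

-- B replaces A's nested index loops (i>j / i<j branch per cell) by a recursive border-peeling of
-- the matrix: each step sums the first row past the diagonal and the first column below it, then
-- recurses on the submatrix without that row and column; objective: alternative decomposition.

-- ===== PORT A =====
-- The body of A's inner loop (the if i > j / elif i < j chain over (cons, expl, total)), named.
def pvCellA (i j : Nat) (v : Int) (st : Int × Int × Int) : Int × Int × Int :=
  if j < i then (st.1 + v, st.2.1, st.2.2 + v)
  else if i < j then (st.1, st.2.1 + v, st.2.2 + v)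
  else st

-- range(len(matrix)) / range(len(matrix[0])) have nonnegative bounds: List.range is exact here;
-- matrix[0] is only evaluated when the outer loop runs (matrix ≠ []), and every matrix[i][j]
-- that A reads into the sums is in range under Pre_, so headD / getD are exact there.
def getStrategyCounts (matrix : List (List Int)) : Int × Int × Int :=
  (List.range matrix.length).foldl (fun st i =>
    (List.range (matrix.headD []).length).foldl
      (fun st j => pvCellA i j ((matrix.getD i []).getD j 0) st) st)
    ((0 : Int), (0 : Int), (0 : Int))

-- ===== PORT B =====
-- _peel(rows, width): head[1:width] (nonnegative clamping slice) is (drop 1).take (width-1);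
-- r[0] is getD 0 0, exact under Pre_ (every row reached there is nonempty); the recursion on
-- [r[1:] for r in rest] is the recursion on rest.map (List.drop 1).
def pvPeel (rows : List (List Int)) (width : Nat) : Int × Int :=
  match rows with
  | [] => (0, 0)
  | head :: rest =>
    if width = 0 then (0, 0)
    else
      let expl := ((head.drop 1).take (width - 1)).sum
      let cons := (rest.map (fun r => r.getD 0 0)).sum
      let p := pvPeel (rest.map (fun r => r.drop 1)) (width - 1)
      (cons + p.1, expl + p.2)
termination_by rows.length
decreasing_by simp

-- n = len(matrix[0]) if matrix else 0 → (matrix.headD []).length (0 on the empty matrix);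
-- round(int, 0) is the identity on Python ints.
def getStrategyCounts_alt (matrix : List (List Int)) : Int × Int × Int :=
  let n := (matrix.headD []).length
  let p := pvPeel matrix n
  (p.1, p.2, p.1 + p.2)

-- ===== PRECONDITION & SPEC =====
-- Pre_ excludes exactly the ragged matrices on which A raises IndexError: row i (of the first
-- len(matrix[0]) columns) must have every off-diagonal entry j ≠ i, so it may only fall short
-- of the declared width when the missing tail is just its own diagonal cell.
def Pre_getStrategyCounts (matrix : List (List Int)) : Prop :=
  ∀ p ∈ matrix.zipIdx,
    (matrix.headD []).length ≤ p.1.length ∨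
    (p.1.length = p.2 ∧ (matrix.headD []).length = p.2 + 1)
instance (matrix : List (List Int)) : Decidable (Pre_getStrategyCounts matrix) := by
  unfold Pre_getStrategyCounts; infer_instance
def pvWitness_getStrategyCounts : List (List Int) := [[0, 1], [2, 0]]

def Spec_getStrategyCounts (matrix : List (List Int)) (out : Int × Int × Int) : Prop := out = getStrategyCounts_alt matrix
instance (matrix : List (List Int)) (out : Int × Int × Int) : Decidable (Spec_getStrategyCounts matrix out) := by unfold Spec_getStrategyCounts; infer_instance

-- ===== CLAIM (what is proved, stated in full; the proofs are below) =====
def Claim_equal_getStrategyCounts : Prop := ∀ (matrix : List (List Int)), Dom_getStrategyCounts matrix → Pre_getStrategyCounts matrix → Spec_getStrategyCounts matrix (getStrategyCounts matrix)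

-- ===== LEMMAS AND PROOFS =====

-- A fold over `range' k xs.length` that reads `full` at the index (where `xs = full.drop k`)
-- is the fold over `xs.zipIdx k`.
theorem pv_foldl_range'_getD {α β : Type} (d : α) (f : β → α → Nat → β) :
    ∀ (xs full : List α) (k : Nat) (init : β), full.drop k = xs →
      (List.range' k xs.length).foldl (fun st i => f st (full.getD i d) i) init
        = (xs.zipIdx k).foldl (fun st p => f st p.1 p.2) init := by
  intro xs
  induction xs with
  | nil => intro full k init _; simp
  | cons x t ih =>
    intro full k init h
    have hx : full.getD k d = x := by
      have h' := congrArg (fun l => l[0]?) h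
      simp only [List.getElem?_drop, Nat.add_zero] at h'
      simp [List.getD, h']
    have ht : full.drop (k + 1) = t := by
      have hdd : (full.drop k).drop 1 = full.drop (k + 1) := by rw [List.drop_drop]
      rw [← hdd, h]; simp
    simp only [List.length_cons, List.range'_succ, List.foldl_cons, List.zipIdx_cons, hx]
    exact ih full (k + 1) (f init x k) ht

-- Entry point at k = 0 with `List.range`.
theorem pv_foldl_range_getD {α β : Type} (d : α) (f : β → α → Nat → β) (xs : List α) (init : β) :
    (List.range xs.length).foldl (fun st i => f st (xs.getD i d) i) init
      = xs.zipIdx.foldl (fun st p => f st p.1 p.2) init := by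
  rw [List.range_eq_range']
  exact pv_foldl_range'_getD d f xs xs 0 init rfl

-- Closed form of A's inner loop over one row of indexed cells.
theorem pv_inner_eval (i : Nat) :
    ∀ (row : List Int) (k : Nat) (c e t : Int),
      (row.zipIdx k).foldl (fun st p => pvCellA i p.2 p.1 st) (c, e, t)
        = (c + (row.take (i - k)).sum, e + (row.drop (i + 1 - k)).sum,
           t + (row.take (i - k)).sum + (row.drop (i + 1 - k)).sum) := by
  intro row
  induction row with
  | nil => intro k c e t; simp
  | cons x rest ih =>
    intro k c e t
    simp only [List.zipIdx_cons, List.foldl_cons]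
    by_cases h1 : k < i
    · have hstep : pvCellA i k x (c, e, t) = (c + x, e, t + x) := by simp [pvCellA, h1]
      have e1 : i - k = (i - (k + 1)) + 1 := by omega
      have e2 : i + 1 - k = (i + 1 - (k + 1)) + 1 := by omega
      rw [hstep, ih (k + 1), e1, e2]
      simp only [List.take_succ_cons, List.drop_succ_cons, List.sum_cons, Prod.mk.injEq]
      and_intros <;> first | trivial | ring
    · by_cases h2 : i < k
      · have hstep : pvCellA i k x (c, e, t) = (c, e + x, t + x) := by simp [pvCellA, h1, h2]
        have e1 : i - k = 0 := by omega
        have e2 : i + 1 - k = 0 := by omega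
        have e3 : i - (k + 1) = 0 := by omega
        have e4 : i + 1 - (k + 1) = 0 := by omega
        rw [hstep, ih (k + 1), e1, e2, e3, e4]
        simp only [List.take_zero, List.drop_zero, List.sum_nil, List.sum_cons, Prod.mk.injEq]
        and_intros <;> first | trivial | ring
      · have hk : k = i := by omega
        subst hk
        have hstep : pvCellA k k x (c, e, t) = (c, e, t) := by simp [pvCellA]
        have e1 : k - k = 0 := by omega
        have e2 : k + 1 - k = 1 := by omega
        have e3 : k - (k + 1) = 0 := by omega
        have e4 : k + 1 - (k + 1) = 0 := by omega
        rw [hstep, ih (k + 1), e1, e2, e3, e4]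
        simp

-- Closed form of A's inner loop over row i of an n-column matrix, assuming only that the row
-- misses no off-diagonal cell (A's no-IndexError condition for that row).
theorem pv_row_eval (i n : Nat) (row : List Int) (c e t : Int)
    (h : n ≤ row.length ∨ (row.length = i ∧ n = i + 1)) :
    (List.range n).foldl (fun st j => pvCellA i j (row.getD j 0) st) (c, e, t)
      = (c + ((row.take n).take i).sum, e + ((row.take n).drop (i + 1)).sum,
         t + ((row.take n).take i).sum + ((row.take n).drop (i + 1)).sum) := by
  rcases h with h1 | ⟨hlen, hn⟩
  · set r := row.take n with hr
    have hlen : r.length = n := by rw [hr]; simp [List.length_take]; omega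
    have hcong : (List.range n).foldl (fun st j => pvCellA i j (row.getD j 0) st) (c, e, t)
        = (List.range n).foldl (fun st j => pvCellA i j (r.getD j 0) st) (c, e, t) := by
      refine PySem.List.foldl_congr_mem _ _ _ _ ?_
      intro acc j hj
      have hjn : j < n := List.mem_range.mp hj
      have hget : r.getD j 0 = row.getD j 0 := by
        rw [hr]; simp [List.getD, hjn]
      rw [hget]
    rw [hcong, ← hlen,
        pv_foldl_range_getD 0 (fun st v j => pvCellA i j v st) r (c, e, t)]
    simpa using pv_inner_eval i r 0 c e t
  · subst hn
    have htake : row.take (i + 1) = row := List.take_of_length_le (by omega)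
    rw [List.range_succ, List.foldl_append]
    rw [show ([i] : List Nat).foldl (fun st j => pvCellA i j (row.getD j 0) st)
          ((List.range i).foldl (fun st j => pvCellA i j (row.getD j 0) st) (c, e, t))
        = (List.range i).foldl (fun st j => pvCellA i j (row.getD j 0) st) (c, e, t) by
      simp [pvCellA]]
    rw [show List.range i = List.range row.length from by rw [hlen],
        pv_foldl_range_getD 0 (fun st v j => pvCellA i j v st) row (c, e, t)]
    have hiv := pv_inner_eval i row 0 c e t
    simp only [Nat.sub_zero] at hiv
    rw [hiv, htake]

-- Closed form of A's outer loop: a fold over indexed rows of an n-column matrix.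
theorem pv_outer_eval (n : Nat) :
    ∀ (l : List (List Int × Nat)) (c e t : Int),
      (∀ p ∈ l, n ≤ p.1.length ∨ (p.1.length = p.2 ∧ n = p.2 + 1)) →
      l.foldl (fun st p =>
          (List.range n).foldl (fun st j => pvCellA p.2 j (p.1.getD j 0) st) st) (c, e, t)
        = (c + (l.map (fun p => ((p.1.take n).take p.2).sum)).sum,
           e + (l.map (fun p => ((p.1.take n).drop (p.2 + 1)).sum)).sum,
           t + (l.map (fun p => ((p.1.take n).take p.2).sum)).sum
             + (l.map (fun p => ((p.1.take n).drop (p.2 + 1)).sum)).sum) := by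
  intro l
  induction l with
  | nil => intro c e t _; simp
  | cons p tail ih =>
    intro c e t hl
    obtain ⟨row, i⟩ := p
    simp only [List.foldl_cons]
    rw [pv_row_eval i n row c e t (by simpa using hl (row, i) List.mem_cons_self),
        ih _ _ _ (fun q hq => hl q (List.mem_cons_of_mem _ hq))]
    simp only [List.map_cons, List.sum_cons, Prod.mk.injEq]
    and_intros <;> first | trivial | ring

-- Summing the first m+1 entries = head + the first m entries of the tail (with 0 defaults).
theorem pv_take_succ_sum (r : List Int) (m : Nat) :
    (r.take (m + 1)).sum = r.getD 0 0 + ((r.drop 1).take m).sum := by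
  cases r <;> simp [List.getD]

-- Closed form of B's border-peeling recursion: the strict lower- and upper-triangle sums
-- (within width w) of the indexed rows.
theorem pv_peel_eval :
    ∀ (l : List (List Int)) (w : Nat),
      pvPeel l w
        = ((l.zipIdx.map (fun p => (p.1.take (min p.2 w)).sum)).sum,
           (l.zipIdx.map (fun p => ((p.1.drop (p.2 + 1)).take (w - (p.2 + 1))).sum)).sum) := by
  intro l w
  induction l, w using pvPeel.induct with
  | case1 w => simp [pvPeel]
  | case2 head rest => simp [pvPeel, List.map_const']
  | case3 w head rest hw ih =>
    obtain ⟨w, rfl⟩ : ∃ w', w = w' + 1 := ⟨w - 1, by omega⟩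
    rw [pvPeel]
    simp only [Nat.succ_ne_zero, if_false, Nat.add_sub_cancel]
    have ha : rest.attach.map (fun x => List.drop 1 x.1) = rest.map (List.drop 1) := by simp
    rw [ha] at ih
    simp only [Nat.add_sub_cancel] at ih
    rw [ih]
    simp only [List.zipIdx_cons, List.zipIdx_succ, List.zipIdx_map, List.map_map,
      List.map_cons, List.sum_cons, Prod.mk.injEq]
    constructor
    · have h1 : (rest.zipIdx.map
          ((fun p : List Int × Nat => (p.1.take (min p.2 (w + 1))).sum) ∘
            fun x : List Int × Nat => (x.1, x.2 + 1)))
          = rest.zipIdx.map (fun p : List Int × Nat =>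
              p.1.getD 0 0 + ((p.1.drop 1).take (min p.2 w)).sum) := by
        refine List.map_congr_left ?_
        intro p _
        have hm : min (p.2 + 1) (w + 1) = min p.2 w + 1 := by omega
        simp only [Function.comp]
        rw [hm, pv_take_succ_sum]
      have h2 : (rest.zipIdx.map
          ((fun p : List Int × Nat => (p.1.take (min p.2 w)).sum) ∘
            Prod.map (fun r : List Int => r.drop 1) id))
          = rest.zipIdx.map (fun p : List Int × Nat =>
              ((p.1.drop 1).take (min p.2 w)).sum) := by
        refine List.map_congr_left ?_
        intro p _
        simp [Prod.map]
      rw [h1, h2, List.sum_map_add]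
      simp only [List.getD]
      rw [show (fun p : List Int × Nat => p.1[0]?.getD 0) = (fun r : List Int => r[0]?.getD 0) ∘ Prod.fst from rfl,
          ← List.map_map, show rest.zipIdx.map Prod.fst = rest from by simp]
      simp
    · have h1 : (rest.zipIdx.map
          ((fun p : List Int × Nat => ((p.1.drop (p.2 + 1)).take (w + 1 - (p.2 + 1))).sum) ∘
            fun x : List Int × Nat => (x.1, x.2 + 1)))
          = rest.zipIdx.map (fun p : List Int × Nat =>
              ((p.1.drop (p.2 + 2)).take (w - (p.2 + 1))).sum) := by
        refine List.map_congr_left ?_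
        intro p _
        have hm : w + 1 - (p.2 + 1 + 1) = w - (p.2 + 1) := by omega
        simp only [Function.comp]
        rw [hm]
      have h2 : (rest.zipIdx.map
          ((fun p : List Int × Nat => ((p.1.drop (p.2 + 1)).take (w - (p.2 + 1))).sum) ∘
            Prod.map (fun r : List Int => r.drop 1) id))
          = rest.zipIdx.map (fun p : List Int × Nat =>
              ((p.1.drop (p.2 + 2)).take (w - (p.2 + 1))).sum) := by
        refine List.map_congr_left ?_
        intro p _
        simp [Prod.map]
      rw [h1, h2]
      simp

-- ===== VERDICT (by name: the statement is the Claim_ definition above) =====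
theorem getStrategyCounts_spec : Claim_equal_getStrategyCounts := by
  intro matrix _ hpre
  show getStrategyCounts matrix = getStrategyCounts_alt matrix
  set n := (matrix.headD []).length with hn
  calc getStrategyCounts matrix
      = matrix.zipIdx.foldl (fun st p =>
          (List.range n).foldl
            (fun st j => pvCellA p.2 j (p.1.getD j 0) st) st) (0, 0, 0) :=
        pv_foldl_range_getD []
          (fun st row i => (List.range n).foldl
            (fun st j => pvCellA i j (row.getD j 0) st) st) matrix (0, 0, 0)
    _ = (0 + (matrix.zipIdx.map (fun p => ((p.1.take n).take p.2).sum)).sum,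
         0 + (matrix.zipIdx.map (fun p => ((p.1.take n).drop (p.2 + 1)).sum)).sum,
         0 + (matrix.zipIdx.map (fun p => ((p.1.take n).take p.2).sum)).sum
           + (matrix.zipIdx.map (fun p => ((p.1.take n).drop (p.2 + 1)).sum)).sum) :=
        pv_outer_eval n matrix.zipIdx 0 0 0 hpre
    _ = getStrategyCounts_alt matrix := by
        show _ = (_, _, _)
        rw [show pvPeel matrix n
              = ((matrix.zipIdx.map (fun p => (p.1.take (min p.2 n)).sum)).sum,
                 (matrix.zipIdx.map (fun p =>
                   ((p.1.drop (p.2 + 1)).take (n - (p.2 + 1))).sum)).sum) from pv_peel_eval matrix n]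
        have hf : (fun p : List Int × Nat => ((p.1.take n).take p.2).sum)
            = (fun p : List Int × Nat => (p.1.take (min p.2 n)).sum) := by
          funext p; rw [List.take_take]
        have hg : (fun p : List Int × Nat => ((p.1.take n).drop (p.2 + 1)).sum)
            = (fun p : List Int × Nat =>
                ((p.1.drop (p.2 + 1)).take (n - (p.2 + 1))).sum) := by
          funext p; rw [List.drop_take]
        rw [hf, hg]
        simp
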